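-- pv_equiv track=rewrite | github.com/xiaoyueli/MOOC | DatastructureAndAlgorithm/DataStructure-ZhejiangU(20160229-20160603)/week11_QQLogin.py | calculateHashcode
-- ===== SOURCE A (Python) =====
-- def isPrime(num):
--     if num < 2:
--         return False
--     for divisor in range(2,num):
--         if num % divisor == 0:
--             return False
--     return True
--
-- def nextPrime(num):
--     while not isPrime(num):
--         num += 1
--
--     return num
--
-- def calculateHashcode(table, qq):
--     bucket = len(table)
--     prime = bucket
--     cnt = 5
--     while cnt > 0:
--         prime = nextPrime(prime)
--         cnt -= 1
--
--     coea = prime % bucket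
--     coeb = prime - bucket
--
--     return (coea * qq - coeb) % prime % bucket
-- ===== SOURCE B (Python) =====
-- def calculateHashcode(table, qq):
--     bucket = len(table)
--     # incremental prime generation: trial-divide each candidate only by the
--     # already-found primes (ascending, so stop at the first p with p*p > n)
--     primes = []
--     n = 2
--     while True:
--         ok = True
--         for p in primes:
--             if p * p > n:
--                 break
--             if n % p == 0:
--                 ok = False
--                 break
--         if ok:
--             primes.append(n)
--             if n >= bucket:
--                 prime = n
--                 break
--         n += 1
--     coea = prime % bucket
--     coeb = prime - bucket
--     return (coea * qq - coeb) % prime % bucket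
-- ===== Notes on version B (the rewrite author's own statement) =====
-- stated objective: alternative
-- what changed: Replaces the unbounded trial-division isPrime plus the dead 5-iteration nextPrime loop with one ascending prime generator that keeps the list of discovered primes, divides each candidate only by found primes whose square does not exceed it, and returns the first generated prime >= len(table).
import Mathlib
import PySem

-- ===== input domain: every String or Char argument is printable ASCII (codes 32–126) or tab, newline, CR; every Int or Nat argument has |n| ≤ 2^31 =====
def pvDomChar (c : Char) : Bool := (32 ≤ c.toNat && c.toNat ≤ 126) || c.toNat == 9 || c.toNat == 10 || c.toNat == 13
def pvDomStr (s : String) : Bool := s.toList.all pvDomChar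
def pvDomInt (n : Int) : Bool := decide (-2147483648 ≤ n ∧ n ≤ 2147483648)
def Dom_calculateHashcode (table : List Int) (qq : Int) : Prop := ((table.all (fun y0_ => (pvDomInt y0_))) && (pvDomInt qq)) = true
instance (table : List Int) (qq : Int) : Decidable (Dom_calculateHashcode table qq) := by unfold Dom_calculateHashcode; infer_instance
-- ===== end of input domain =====

-- B replaces A's trial-division isPrime + dead 5-step nextPrime loop with an ascending
-- incremental prime generator (list of found primes, divide only by primes p with p*p ≤ n);
-- objective: alternative algorithm, same return value on every non-empty table.


-- ===== PORT A =====
-- isPrime: the for-loop with early `return False` is exactly `.all` over range(2, num)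
def pyIsPrime (num : Int) : Bool :=
  if num < 2 then false
  else (PySem.List.pyRange 2 num 1).all (fun divisor => decide (PySem.Int.mod num divisor ≠ 0))

-- needed (by name) for the termination of nextPrime's while-loop
theorem pyIsPrime_iff (n : Int) : pyIsPrime n = true ↔ 2 ≤ n ∧ Nat.Prime n.toNat := by
  by_cases h : n < 2
  · simp [pyIsPrime, h]
  · rw [not_lt] at h
    simp only [pyIsPrime, if_neg (by omega : ¬ n < 2), List.all_eq_true,
      PySem.List.mem_pyRange_one, decide_eq_true_eq]
    constructor
    · intro hall
      refine ⟨h, ?_⟩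
      rw [Nat.prime_def_lt]
      refine ⟨by omega, ?_⟩
      intro m hm hdvd
      by_contra hm1
      rcases Nat.eq_zero_or_pos m with h0 | hpos
      · subst h0; simp at hdvd; omega
      · have h2m : 2 ≤ m := by omega
        have : ¬ PySem.Int.mod n (m : Int) = 0 :=
          hall (m : Int) ⟨by exact_mod_cast h2m, by omega⟩
        rw [PySem.Int.mod_eq_zero_iff_dvd] at this
        apply this
        have : (m : Int) ∣ (n.toNat : Int) := Int.natCast_dvd_natCast.mpr hdvd
        rwa [Int.toNat_of_nonneg (by omega)] at this
    · rintro ⟨-, hp⟩ d ⟨hd2, hdn⟩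
      rw [Ne, PySem.Int.mod_eq_zero_iff_dvd]
      intro hdvd
      have hd0 : 0 ≤ d := by omega
      have hdvdN : d.toNat ∣ n.toNat := by
        rw [← Int.natCast_dvd_natCast, Int.toNat_of_nonneg hd0, Int.toNat_of_nonneg (by omega)]
        exact hdvd
      rcases (Nat.Prime.eq_one_or_self_of_dvd hp _ hdvdN) with h1 | hs
      · omega
      · omega

-- needed (by name) by nextPrime: the while-loop always terminates
theorem exists_pyIsPrime_ge (num : Int) : ∃ k : ℕ, pyIsPrime (num + (k : Int)) = true := by
  obtain ⟨p, hge, hp⟩ := Nat.exists_infinite_primes (max 2 num.toNat)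
  refine ⟨((p : Int) - num).toNat, ?_⟩
  have hnum : num ≤ (p : Int) := by
    rcases le_or_gt num 0 with h | h
    · omega
    · have : num.toNat ≤ p := le_trans (le_max_right _ _) hge
      omega
  have : num + (((p : Int) - num).toNat : Int) = (p : Int) := by omega
  rw [this, pyIsPrime_iff]
  have h2 : 2 ≤ p := le_trans (le_max_left _ _) hge
  exact ⟨by exact_mod_cast h2, by simpa using hp⟩

-- while not isPrime(num): num += 1  — linear upward search
def nextPrime (num : Int) : Int :=
  num + ((Nat.find (exists_pyIsPrime_ge num) : ℕ) : Int)

-- cnt = 5; while cnt > 0: prime = nextPrime(prime); cnt -= 1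
def aloop : Nat → Int → Int
  | 0, p => p
  | c + 1, p => aloop c (nextPrime p)

def calculateHashcode (table : List Int) (qq : Int) : Int :=
  let bucket : Int := table.length
  let prime : Int := aloop 5 bucket
  let coea : Int := PySem.Int.mod prime bucket
  let coeb : Int := prime - bucket
  PySem.Int.mod (PySem.Int.mod (coea * qq - coeb) prime) bucket

-- ===== PORT B =====
-- the for-loop over primes with the two early breaks (primes is ascending)
def trialOk : List Int → Int → Bool
  | [], _ => true
  | p :: ps, n =>
    if p * p > n then true
    else if PySem.Int.mod n p = 0 then false
    else trialOk ps n

-- totality fuel for B's while True loop; proved sufficient below (Bertrand)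
def bfuel (bucket : Int) : Nat := 2 * bucket.toNat + 4

def bloop (bucket : Int) : Nat → List Int → Int → Int
  | 0, _, n => n            -- fuel exhausted: unreachable, proved below
  | f + 1, primes, n =>
    if trialOk primes n then
      if bucket ≤ n then n
      else bloop bucket f (primes ++ [n]) (n + 1)
    else bloop bucket f primes (n + 1)

def calculateHashcode_alt (table : List Int) (qq : Int) : Int :=
  let bucket : Int := table.length
  let prime : Int := bloop bucket (bfuel bucket) [] 2
  let coea : Int := PySem.Int.mod prime bucket
  let coeb : Int := prime - bucket
  PySem.Int.mod (PySem.Int.mod (coea * qq - coeb) prime) bucket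

-- ===== PRECONDITION & SPEC =====
-- A raises ZeroDivisionError on the empty table (prime % 0); B raises there too.
def Pre_calculateHashcode (table : List Int) (qq : Int) : Prop := table ≠ []
instance (table : List Int) (qq : Int) : Decidable (Pre_calculateHashcode table qq) := by
  unfold Pre_calculateHashcode; infer_instance

def pvWitness_calculateHashcode : List Int × Int := ([3, 5], 7)

def Spec_calculateHashcode (table : List Int) (qq : Int) (out : Int) : Prop := out = calculateHashcode_alt table qq
instance (table : List Int) (qq : Int) (out : Int) : Decidable (Spec_calculateHashcode table qq out) := by unfold Spec_calculateHashcode; infer_instance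

-- ===== CLAIM (what is proved, stated in full; the proofs are below) =====
def Claim_equal_calculateHashcode : Prop := ∀ (table : List Int) (qq : Int), Dom_calculateHashcode table qq → Pre_calculateHashcode table qq → Spec_calculateHashcode table qq (calculateHashcode table qq)

-- ===== LEMMAS AND PROOFS =====

theorem pyIsPrime_nextPrime (num : Int) : pyIsPrime (nextPrime num) = true :=
  Nat.find_spec (exists_pyIsPrime_ge num)

theorem le_nextPrime (num : Int) : num ≤ nextPrime num := by
  unfold nextPrime; omega

theorem nextPrime_min (num m : Int) (h1 : num ≤ m) (h2 : m < nextPrime num) :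
    pyIsPrime m = false := by
  have hk : ((m - num).toNat : Int) = m - num := Int.toNat_of_nonneg (by omega)
  have hlt : (m - num).toNat < Nat.find (exists_pyIsPrime_ge num) := by
    unfold nextPrime at h2; omega
  have := Nat.find_min (exists_pyIsPrime_ge num) hlt
  have hm : num + (((m - num).toNat : ℕ) : Int) = m := by omega
  rw [hm] at this
  simpa using this

theorem nextPrime_fix (p : Int) (h : pyIsPrime p = true) : nextPrime p = p := by
  unfold nextPrime
  have : Nat.find (exists_pyIsPrime_ge p) = 0 := by
    rw [Nat.find_eq_zero]
    simpa using h
  omega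

theorem aloop_of_prime (c : Nat) (p : Int) (h : pyIsPrime p = true) : aloop c p = p := by
  induction c with
  | zero => rfl
  | succ c ih => simp [aloop, nextPrime_fix p h, ih]

theorem aloop_five (b : Int) : aloop 5 b = nextPrime b := by
  show aloop 4 (nextPrime b) = nextPrime b
  exact aloop_of_prime 4 _ (pyIsPrime_nextPrime b)

-- loop invariant for B: primes holds exactly the primes below n, in ascending order
def PrimesInv (primes : List Int) (n : Int) : Prop :=
  2 ≤ n ∧ (∀ p ∈ primes, 2 ≤ p ∧ p < n) ∧
    (∀ q : Int, 2 ≤ q → q < n → pyIsPrime q = true → q ∈ primes) ∧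
    primes.Pairwise (· < ·)

theorem trialOk_true (n : Int) (primes : List Int)
    (hall : ∀ d : Int, 2 ≤ d → d < n → PySem.Int.mod n d ≠ 0)
    (hmem : ∀ p ∈ primes, 2 ≤ p ∧ p < n) : trialOk primes n = true := by
  induction primes with
  | nil => rfl
  | cons p ps ih =>
    rw [trialOk]
    split_ifs with h1 h2
    · rfl
    · obtain ⟨hp2, hpn⟩ := hmem p (List.mem_cons_self ..)
      exact absurd h2 (hall p hp2 hpn)
    · exact ih (fun q hq => hmem q (List.mem_cons_of_mem _ hq))

theorem trialOk_false (n : Int) (primes : List Int) (q : Int)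
    (hq : q ∈ primes) (hsq : q * q ≤ n) (hdvd : PySem.Int.mod n q = 0)
    (hpos : ∀ p ∈ primes, 2 ≤ p) (hsort : primes.Pairwise (· < ·)) :
    trialOk primes n = false := by
  induction primes with
  | nil => exact absurd hq (List.not_mem_nil)
  | cons p ps ih =>
    rw [trialOk]
    rcases List.mem_cons.mp hq with heq | htl
    · subst heq
      rw [if_neg (by omega), if_pos hdvd]
    · have hpq : p < q := (List.pairwise_cons.mp hsort).1 q htl
      have hp2 : 2 ≤ p := hpos p (List.mem_cons_self ..)
      have hq2 : 2 ≤ q := hpos q hq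
      have hppn : ¬ p * p > n := by nlinarith
      rw [if_neg hppn]
      split_ifs with h2
      · rfl
      · exact ih htl (fun r hr => hpos r (List.mem_cons_of_mem _ hr))
          (List.pairwise_cons.mp hsort).2

theorem trialOk_eq (primes : List Int) (n : Int) (h : PrimesInv primes n) :
    trialOk primes n = pyIsPrime n := by
  obtain ⟨h2, hmem, hcomp, hsort⟩ := h
  by_cases hp : pyIsPrime n = true
  · rw [hp]
    rw [pyIsPrime] at hp
    rw [if_neg (by omega : ¬ n < 2)] at hp
    simp only [List.all_eq_true, PySem.List.mem_pyRange_one, decide_eq_true_eq] at hp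
    exact trialOk_true n primes (fun d hd2 hdn => hp d ⟨hd2, hdn⟩) hmem
  · rw [Bool.eq_false_iff.mpr hp]
    -- n ≥ 2 is not prime: its least prime factor is in primes and divides it
    have hnp : ¬ Nat.Prime n.toNat := by
      intro hc; exact hp ((pyIsPrime_iff n).mpr ⟨h2, hc⟩)
    set N := n.toNat with hN
    have hN2 : 2 ≤ N := by omega
    have hmf : (N.minFac).Prime := Nat.minFac_prime (by omega)
    have hdvd : N.minFac ∣ N := Nat.minFac_dvd N
    have hsq : N.minFac * N.minFac ≤ N := by
      have := Nat.minFac_sq_le_self (by omega : 0 < N) hnp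
      nlinarith [this, sq_nonneg N.minFac]
    have hlt : N.minFac < N := by
      rcases Nat.lt_or_ge N.minFac N with h | h
      · exact h
      · have hle : N.minFac ≤ N := Nat.le_of_dvd (by omega) hdvd
        have : N.minFac = N := by omega
        rw [this] at hmf; exact absurd hmf hnp
    have hmem' : ((N.minFac : ℕ) : Int) ∈ primes := by
      apply hcomp
      · exact_mod_cast hmf.two_le
      · omega
      · rw [pyIsPrime_iff]
        constructor
        · exact_mod_cast hmf.two_le
        · simpa using hmf
    have hnN : (N : Int) = n := by rw [hN]; exact Int.toNat_of_nonneg (by omega)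
    have hsqI : (N.minFac : Int) * (N.minFac : Int) ≤ n := by
      rw [← hnN]; exact_mod_cast hsq
    have hdd : (N.minFac : Int) ∣ n := by
      have h1 : (N.minFac : Int) ∣ (N : Int) := Int.natCast_dvd_natCast.mpr hdvd
      rwa [hnN] at h1
    exact trialOk_false n primes _ hmem' hsqI
      ((PySem.Int.mod_eq_zero_iff_dvd n _).mpr hdd)
      (fun p hp' => (hmem p hp').1) hsort

theorem bloop_eq_target (bucket a : Int)
    (ha2 : 2 ≤ a) (hab : bucket ≤ a) (hap : pyIsPrime a = true)
    (hmin : ∀ m, bucket ≤ m → m < a → pyIsPrime m = false) :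
    ∀ (fuel : Nat) (primes : List Int) (n : Int), PrimesInv primes n → n ≤ a →
      (a - n).toNat < fuel → bloop bucket fuel primes n = a := by
  intro fuel
  induction fuel with
  | zero => intro primes n _ _ hf; omega
  | succ f ih =>
    intro primes n hInv hna hf
    rcases eq_or_lt_of_le hna with heq | hlt
    · subst heq
      rw [bloop, trialOk_eq _ _ hInv, hap, if_pos rfl, if_pos hab]
    · obtain ⟨h2, hmem, hcomp, hsort⟩ := hInv
      rw [bloop, trialOk_eq _ _ ⟨h2, hmem, hcomp, hsort⟩]
      by_cases hp : pyIsPrime n = true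
      · rw [hp, if_pos rfl]
        have hnb : ¬ bucket ≤ n := by
          intro hb
          have := hmin n hb hlt
          rw [hp] at this; exact Bool.noConfusion this
        rw [if_neg hnb]
        apply ih
        · refine ⟨by omega, ?_, ?_, ?_⟩
          · intro p hpm
            rcases List.mem_append.mp hpm with h | h
            · have := hmem p h; omega
            · simp at h; omega
          · intro q hq2 hqn hqp
            rcases lt_or_ge q n with h | h
            · exact List.mem_append_left _ (hcomp q hq2 h hqp)
            · have : q = n := by omega
              subst this; simp
          · rw [List.pairwise_append]
            refine ⟨hsort, List.pairwise_singleton _ _, ?_⟩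
            intro a ha b hb
            simp at hb; subst hb
            exact (hmem a ha).2
        · omega
        · omega
      · rw [Bool.eq_false_iff.mpr hp, if_neg (by simp)]
        apply ih
        · refine ⟨by omega, ?_, ?_, hsort⟩
          · intro p hpm; have := hmem p hpm; omega
          · intro q hq2 hqn hqp
            rcases lt_or_ge q n with h | h
            · exact hcomp q hq2 h hqp
            · have : q = n := by omega
              subst this; rw [hqp] at hp; exact absurd rfl hp
        · omega
        · omega

-- B's search returns exactly A's nextPrime of the bucket, for bucket ≥ 1
theorem bloop_eq_nextPrime (bucket : Int) (hb : 1 ≤ bucket) :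
    bloop bucket (bfuel bucket) [] 2 = nextPrime bucket := by
  set a := nextPrime bucket with ha
  have hap : pyIsPrime a = true := pyIsPrime_nextPrime bucket
  have hab : bucket ≤ a := le_nextPrime bucket
  have ha2 : 2 ≤ a := by
    by_contra h
    rw [pyIsPrime, if_pos (by omega)] at hap
    exact Bool.noConfusion hap
  have hmin : ∀ m, bucket ≤ m → m < a → pyIsPrime m = false :=
    fun m h1 h2 => nextPrime_min bucket m h1 h2
  apply bloop_eq_target bucket a ha2 hab hap hmin
  · exact ⟨le_refl 2, by simp, by intro q h1 h2 _; omega, List.Pairwise.nil⟩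
  · exact ha2
  · -- Bertrand: some prime p with bucket.toNat < p ≤ 2 * bucket.toNat bounds a
    obtain ⟨p, hp, hgt, hle⟩ :=
      Nat.exists_prime_lt_and_le_two_mul bucket.toNat (by omega)
    have hpP : pyIsPrime (p : Int) = true := by
      rw [pyIsPrime_iff]
      exact ⟨by exact_mod_cast hp.two_le, by simpa using hp⟩
    have hbp : bucket ≤ (p : Int) := by omega
    have hap' : a ≤ (p : Int) := by
      by_contra h
      rw [not_le] at h
      have := hmin (p : Int) hbp h
      rw [hpP] at this; exact Bool.noConfusion this
    unfold bfuel
    omega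

-- ===== VERDICT (by name: the statement is the Claim_ definition above) =====
theorem calculateHashcode_spec : Claim_equal_calculateHashcode := by
  intro table qq _ hpre
  simp only [Spec_calculateHashcode, calculateHashcode, calculateHashcode_alt]
  have hb : 1 ≤ (table.length : Int) := by
    cases table with
    | nil => exact absurd rfl hpre
    | cons x xs => simp
  rw [aloop_five, bloop_eq_nextPrime _ hb]
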